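-- pv_equiv track=rewrite | github.com/idsla/Scarlet-PETs | sitao/federated2/utils.py | OR_arrays
-- ===== SOURCE A (Python) =====
-- def OR_arrays(array_list):
--     res = []
--     for integers in zip(*array_list):
--         init = 0
--         for integer in integers:
--             init = init | integer
--         res.append(init)
--     return res
-- ===== SOURCE B (Python) =====
-- def OR_arrays(array_list):
--     if not array_list:
--         return []
--     res = list(array_list[0])
--     for arr in array_list[1:]:
--         res = [r | a for r, a in zip(res, arr)]
--     return res
-- ===== Notes on version B (the rewrite author's own statement) =====
-- stated objective: alternative
-- what changed: B transposes the loop nest: instead of iterating column-by-column over zip(*array_list) with an inner OR fold, it keeps a whole running result vector initialised from the first array and folds the remaining arrays into it one at a time (zip truncation reproduces the shortest-length behaviour).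
import Mathlib
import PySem

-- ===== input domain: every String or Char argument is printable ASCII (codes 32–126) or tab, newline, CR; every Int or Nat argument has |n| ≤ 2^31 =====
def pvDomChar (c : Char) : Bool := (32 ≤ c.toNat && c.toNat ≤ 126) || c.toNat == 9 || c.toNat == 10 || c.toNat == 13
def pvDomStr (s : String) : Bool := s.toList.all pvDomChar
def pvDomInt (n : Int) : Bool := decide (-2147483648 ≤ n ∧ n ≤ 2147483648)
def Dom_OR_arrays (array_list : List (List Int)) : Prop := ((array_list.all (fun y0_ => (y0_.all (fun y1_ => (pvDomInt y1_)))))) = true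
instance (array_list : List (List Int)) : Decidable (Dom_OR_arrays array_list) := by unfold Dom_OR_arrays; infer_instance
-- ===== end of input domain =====

-- B transposes the loop nest: a running result vector initialised from the first array, folding the
-- remaining arrays into it, instead of A's column-by-column iteration over zip(*array_list).

-- ===== PORT A =====
-- termination helper for pyZipCols, cited by name in decreasing_by
theorem pvTailSumLt (b : List Int) (bs : List (List Int)) (hb : b ≠ []) :
    (((b :: bs).map List.tail).map List.length).sum < ((b :: bs).map List.length).sum := by
  simp only [List.map_cons, List.map_map, List.sum_cons]
  have h1 : b.tail.length < b.length := by
    cases b with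
    | nil => exact absurd rfl hb
    | cons x xs => simp
  have h2 : (bs.map (List.length ∘ List.tail)).sum ≤ (bs.map List.length).sum := by
    apply List.sum_le_sum
    intro a _
    cases a <;> simp
  omega

-- zip(*array_list): the list of columns, stopping at the shortest array (zip() with no
-- arguments yields nothing).  `headI` is only read when every array is nonempty.
def pyZipCols (ls : List (List Int)) : List (List Int) :=
  if h : ls = [] ∨ ls.any (·.isEmpty) then []
  else (ls.map List.headI) :: pyZipCols (ls.map List.tail)
termination_by (ls.map List.length).sum
decreasing_by
  rw [not_or] at h
  obtain ⟨hne, hall⟩ := h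
  cases ls with
  | nil => exact absurd rfl hne
  | cons b bs =>
    have hb : b ≠ [] := by
      intro hb
      apply hall
      rw [List.any_eq_true]
      exact ⟨b, List.mem_cons_self, by rw [hb]; rfl⟩
    simpa using pvTailSumLt b bs hb

def OR_arrays (array_list : List (List Int)) : List Int :=
  (pyZipCols array_list).map (fun integers =>
    integers.foldl (fun init integer => PySem.Int.bor init integer) 0)

-- ===== PORT B =====
def OR_arrays_alt (array_list : List (List Int)) : List Int :=
  match array_list with
  | [] => []
  | a :: rest =>
    rest.foldl (fun res arr => (res.zip arr).map (fun p => PySem.Int.bor p.1 p.2)) a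

-- ===== PRECONDITION & SPEC =====
def Spec_OR_arrays (array_list : List (List Int)) (out : List Int) : Prop := out = OR_arrays_alt array_list
instance (array_list : List (List Int)) (out : List Int) : Decidable (Spec_OR_arrays array_list out) := by unfold Spec_OR_arrays; infer_instance

-- ===== CLAIM (what is proved, stated in full; the proofs are below) =====
def Claim_equal_OR_arrays : Prop := ∀ (array_list : List (List Int)), Dom_OR_arrays array_list → Spec_OR_arrays array_list (OR_arrays array_list)

-- ===== LEMMAS AND PROOFS =====

-- if no array in ls is empty, none is []
theorem no_empty_mem {ls : List (List Int)} (h : ¬ ls.any (·.isEmpty) = true)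
    {a : List Int} (ha : a ∈ ls) : a ≠ [] := by
  intro hn
  apply h
  rw [List.any_eq_true]
  exact ⟨a, ha, by rw [hn]; rfl⟩

-- entry i of a tail, totalised with default 0, shifts the index
theorem tail_getD (a : List Int) (i : ℕ) : a.tail.getD i 0 = a.getD (i + 1) 0 := by
  cases a <;> simp [List.getD]

-- characterisation of the columns produced by pyZipCols
theorem pyZipCols_get? (i : ℕ) : ∀ ls : List (List Int),
    (pyZipCols ls)[i]? =
      if ls ≠ [] ∧ ∀ arr ∈ ls, i < arr.length then some (ls.map (fun a => a.getD i 0))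
      else none := by
  induction i with
  | zero =>
    intro ls
    rw [pyZipCols]
    split
    · rename_i h
      have hc : ¬ (ls ≠ [] ∧ ∀ arr ∈ ls, 0 < arr.length) := by
        rintro ⟨hne, hall⟩
        rcases h with h | h
        · exact hne h
        · rw [List.any_eq_true] at h
          obtain ⟨a, ha, hae⟩ := h
          have := hall a ha
          rw [List.isEmpty_iff_length_eq_zero] at hae
          omega
      rw [if_neg hc]
      simp
    · rename_i h
      rw [not_or] at h
      have hc : ls ≠ [] ∧ ∀ arr ∈ ls, 0 < arr.length := by
        refine ⟨h.1, fun a ha => ?_⟩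
        have := no_empty_mem h.2 ha
        cases a with
        | nil => exact absurd rfl this
        | cons x xs => simp
      rw [if_pos hc]
      simp only [List.getElem?_cons_zero, Option.some.injEq]
      apply List.map_congr_left
      intro a _
      cases a <;> simp [List.getD]
  | succ i ih =>
    intro ls
    rw [pyZipCols]
    split
    · rename_i h
      have hc : ¬ (ls ≠ [] ∧ ∀ arr ∈ ls, i + 1 < arr.length) := by
        rintro ⟨hne, hall⟩
        rcases h with h | h
        · exact hne h
        · rw [List.any_eq_true] at h
          obtain ⟨a, ha, hae⟩ := h
          have := hall a ha
          rw [List.isEmpty_iff_length_eq_zero] at hae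
          omega
      rw [if_neg hc]
      simp
    · rename_i h
      rw [not_or] at h
      simp only [List.getElem?_cons_succ]
      rw [ih]
      by_cases hc : ls ≠ [] ∧ ∀ arr ∈ ls, i + 1 < arr.length
      · have hc' : ls.map List.tail ≠ [] ∧ ∀ t ∈ ls.map List.tail, i < t.length := by
          constructor
          · simpa using hc.1
          · intro t ht
            rw [List.mem_map] at ht
            obtain ⟨a, ha, rfl⟩ := ht
            have := hc.2 a ha
            cases a with
            | nil => simp at this
            | cons x xs => simpa using this
        rw [if_pos hc', if_pos hc]
        simp only [List.map_map, Option.some.injEq]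
        apply List.map_congr_left
        intro a _
        exact tail_getD a i
      · have hc' : ¬ (ls.map List.tail ≠ [] ∧ ∀ t ∈ ls.map List.tail, i < t.length) := by
          rintro ⟨hne, hall⟩
          apply hc
          constructor
          · intro hn; rw [hn] at hne; simp at hne
          · intro a ha
            have hne' := no_empty_mem h.2 ha
            have := hall a.tail (List.mem_map_of_mem ha)
            cases a with
            | nil => exact absurd rfl hne'
            | cons x xs => simpa using this
        rw [if_neg hc', if_neg hc]

-- one B step, read at index i
theorem step_get? (res arr : List Int) (i : ℕ) :
    ((res.zip arr).map (fun p : Int × Int => PySem.Int.bor p.1 p.2))[i]? =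
      (res[i]?.bind fun r => arr[i]?.map fun x => PySem.Int.bor r x) := by
  simp only [List.getElem?_map, List.zip, List.getElem?_zipWith]
  cases res[i]? <;> cases arr[i]? <;> simp

-- B's fold, read at index i
theorem foldl_step_get? (i : ℕ) : ∀ (rest : List (List Int)) (acc : List Int),
    (rest.foldl (fun res arr => (res.zip arr).map (fun p : Int × Int => PySem.Int.bor p.1 p.2)) acc)[i]? =
      if ∀ arr ∈ rest, i < arr.length then
        acc[i]?.map (fun v => rest.foldl (fun v arr => PySem.Int.bor v (arr.getD i 0)) v)
      else none := by
  intro rest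
  induction rest with
  | nil =>
    intro acc
    simp
  | cons arr rest ih =>
    intro acc
    simp only [List.foldl_cons]
    rw [ih, step_get?]
    by_cases ha : i < arr.length
    · have harr : arr[i]? = some (arr.getD i 0) := by
        rw [List.getElem?_eq_getElem ha, List.getD_eq_getElem _ _ ha]
      by_cases hr : ∀ a ∈ rest, i < a.length
      · have hall : ∀ a ∈ arr :: rest, i < a.length := by
          intro a h
          rcases List.mem_cons.mp h with h | h
          · subst h; exact ha
          · exact hr a h
        rw [if_pos hr, if_pos hall, harr]
        cases acc[i]? <;> simp
      · have hnall : ¬ ∀ a ∈ arr :: rest, i < a.length := by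
          intro hcon
          exact hr fun a h => hcon a (List.mem_cons_of_mem _ h)
        rw [if_neg hr, if_neg hnall]
    · have harr : arr[i]? = none := by
        rw [List.getElem?_eq_none_iff]; omega
      have hnall : ¬ ∀ a ∈ arr :: rest, i < a.length := by
        intro hcon
        exact ha (hcon arr List.mem_cons_self)
      rw [if_neg hnall, harr]
      split
      · cases acc[i]? <;> simp
      · rfl

theorem OR_arrays_eq_alt (array_list : List (List Int)) :
    OR_arrays array_list = OR_arrays_alt array_list := by
  cases array_list with
  | nil =>
    rw [OR_arrays, pyZipCols]
    simp [OR_arrays_alt]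
  | cons a rest =>
    apply List.ext_getElem?
    intro i
    rw [OR_arrays, OR_arrays_alt, List.getElem?_map, pyZipCols_get?, foldl_step_get?]
    by_cases hr : ∀ arr ∈ rest, i < arr.length
    · by_cases haa : i < a.length
      · rw [if_pos ⟨List.cons_ne_nil a rest, by
            intro arr h
            rcases List.mem_cons.mp h with h | h
            · subst h; exact haa
            · exact hr arr h⟩,
          if_pos hr]
        rw [List.getElem?_eq_getElem haa]
        simp only [Option.map_some, List.map_cons, List.foldl_cons, List.foldl_map,
          Option.some.injEq]
        rw [List.getD_eq_getElem _ _ haa]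
        rw [PySem.Int.bor_comm 0 _, PySem.Int.bor_zero]
      · rw [if_neg (by rintro ⟨-, hall⟩; exact haa (hall a List.mem_cons_self)), if_pos hr]
        rw [List.getElem?_eq_none_iff.mpr (by omega)]
        rfl
    · rw [if_neg (by rintro ⟨-, hall⟩; exact hr fun arr h => hall arr (List.mem_cons_of_mem _ h)),
        if_neg hr]
      rfl

-- ===== VERDICT (by name: the statement is the Claim_ definition above) =====
theorem OR_arrays_spec : Claim_equal_OR_arrays := by
  intro array_list _
  unfold Spec_OR_arrays
  exact OR_arrays_eq_alt array_list
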